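-- pv_equiv track=rewrite | github.com/cognitedata/library | modules/accelerators/contextualization/cdf_file_annotation/streamlit/file_annotation_dashboard_pipeline_health/data_processor.py | filter_log_lines
-- ===== SOURCE A (Python) =====
-- def filter_log_lines(logs: str, file_ext_id: str, context_lines: int = 2) -> str:
--     if not logs or not file_ext_id:
--         return ""
--
--     lines = logs.splitlines()
--     matching_indices = [i for i, ln in enumerate(lines) if file_ext_id in ln]
--
--     if not matching_indices:
--         return ""
--
--     selected_ranges = []
--
--     for idx in matching_indices:
--         start = max(0, idx - context_lines)
--         end = min(len(lines), idx + context_lines + 1)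
--         selected_ranges.append((start, end))
--
--     merged = []
--
--     for start, end in sorted(selected_ranges):
--         if not merged or start > merged[-1][1]:
--             merged.append([start, end])
--         else:
--             merged[-1][1] = max(merged[-1][1], end)
--
--     out_blocks = []
--
--     for start, end in merged:
--         block = lines[start:end]
--         out_blocks.append("\n".join(block))
--
--     return "\n\n---\n\n".join(out_blocks)
-- ===== SOURCE B (Python) =====
-- def filter_log_lines(logs: str, file_ext_id: str, context_lines: int = 2) -> str:
--     if not logs or not file_ext_id:
--         return ""
--
--     lines = logs.splitlines()
--     n = len(lines)
--
--     def near(j):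
--         # line j is kept iff some line within context_lines of it contains the id
--         return any(file_ext_id in lines[i]
--                    for i in range(max(0, j - context_lines), min(n, j + context_lines + 1)))
--
--     blocks = []
--     run = []
--     for j in range(n):
--         if near(j):
--             run.append(lines[j])
--         elif run:
--             blocks.append("\n".join(run))
--             run = []
--     if run:
--         blocks.append("\n".join(run))
--
--     return "\n\n---\n\n".join(blocks)
-- ===== Notes on version B (the rewrite author's own statement) =====
-- stated objective: alternative
-- what changed: B drops A's interval pipeline (per-match context windows, a range list, a sort and an interval-merge loop) entirely: it defines a kept-index predicate 'near(j) = some line within context_lines of j matches' and does one run-detection sweep over the line indices, collecting maximal runs of kept lines into blocks.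
-- outside the precondition, e.g. on filter_log_lines('a\nb\na', 'a', -1): A returns '\n\n---\n\n', B returns ''
import Mathlib
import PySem

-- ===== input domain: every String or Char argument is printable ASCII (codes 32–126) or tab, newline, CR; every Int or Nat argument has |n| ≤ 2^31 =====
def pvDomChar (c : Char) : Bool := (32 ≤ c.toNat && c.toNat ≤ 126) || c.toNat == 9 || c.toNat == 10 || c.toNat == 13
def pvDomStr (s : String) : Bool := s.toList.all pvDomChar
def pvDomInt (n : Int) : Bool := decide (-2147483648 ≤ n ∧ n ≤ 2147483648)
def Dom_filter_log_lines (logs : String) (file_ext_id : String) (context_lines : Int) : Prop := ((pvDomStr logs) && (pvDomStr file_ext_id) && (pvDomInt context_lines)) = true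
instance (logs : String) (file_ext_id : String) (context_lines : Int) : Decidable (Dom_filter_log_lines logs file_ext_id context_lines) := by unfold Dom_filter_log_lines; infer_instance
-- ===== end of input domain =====

-- B replaces A's interval pipeline (context windows, range list, sort, interval-merge loop) by a
-- kept-line predicate ("some line within context_lines matches") plus one run-detection sweep
-- (objective: alternative). Pre_ restricts to the natural domain 0 ≤ context_lines.


-- ===== PORT A =====
-- Python sorts the (start, end) pairs lexicographically; the key 'toLex' gives exactly that order on Int × Int.
def filter_log_lines (logs : String) (file_ext_id : String) (context_lines : Int) : String :=
  if logs = "" ∨ file_ext_id = "" then "" else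
  let lines := PySem.Str.splitlines logs
  let matching_indices := (PySem.List.enumerate lines 0).foldl
      (fun acc p => if PySem.Str.isIn file_ext_id p.2 then acc ++ [p.1] else acc) []
  if matching_indices = [] then "" else
  let selected_ranges := matching_indices.foldl
      (fun acc idx => acc ++ [(max 0 (idx - context_lines),
                               min ((lines.length : Int)) (idx + context_lines + 1))]) []
  -- merged, built back-to-front (head = Python's merged[-1]), reversed below
  let mergedRev := (PySem.List.sorted selected_ranges (fun p => toLex p) false).foldl
      (fun acc p => match acc with
        | [] => [p]
        | q :: rest => if p.1 > q.2 then p :: q :: rest else (q.1, max q.2 p.2) :: rest) []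
  let merged := mergedRev.reverse
  let out_blocks := merged.foldl
      (fun acc p => acc ++ [PySem.Str.join "\n" (PySem.List.slice lines (some p.1) (some p.2))]) []
  PySem.Str.join "\n\n---\n\n" out_blocks

-- ===== PORT B =====
def filter_log_lines_alt (logs : String) (file_ext_id : String) (context_lines : Int) : String :=
  if logs = "" ∨ file_ext_id = "" then "" else
  let lines := PySem.Str.splitlines logs
  let n : Int := lines.length
  -- near j: some line within context_lines of line j contains the id (lines[i] is always in range)
  let near : Int → Bool := fun j =>
    (PySem.List.pyRange (max 0 (j - context_lines)) (min n (j + context_lines + 1)) 1).any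
      (fun i => PySem.Str.isIn file_ext_id (PySem.List.pyGetD lines i ""))
  let st := (PySem.List.pyRange 0 n 1).foldl
      (fun (st : List String × List String) j =>
        if near j then (st.1, st.2 ++ [PySem.List.pyGetD lines j ""])
        else if st.2 ≠ [] then (st.1 ++ [PySem.Str.join "\n" st.2], [])
        else st) ([], [])
  PySem.Str.join "\n\n---\n\n" (if st.2 ≠ [] then st.1 ++ [PySem.Str.join "\n" st.2] else st.1)

-- ===== PRECONDITION & SPEC =====
-- Pre_ excludes negative context_lines: a negative context width is outside the function's natural
-- domain; there A returns separator-joined empty blocks (an artefact of its empty ranges) while B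
-- naturally returns "".
def Pre_filter_log_lines (logs : String) (file_ext_id : String) (context_lines : Int) : Prop :=
  0 ≤ context_lines
instance (logs : String) (file_ext_id : String) (context_lines : Int) : Decidable (Pre_filter_log_lines logs file_ext_id context_lines) := by unfold Pre_filter_log_lines; infer_instance
def pvWitness_filter_log_lines : String × String × Int := ("ERR file-7\nok\nok\nERR file-7", "file-7", 1)
def Spec_filter_log_lines (logs : String) (file_ext_id : String) (context_lines : Int) (out : String) : Prop := out = filter_log_lines_alt logs file_ext_id context_lines
instance (logs : String) (file_ext_id : String) (context_lines : Int) (out : String) : Decidable (Spec_filter_log_lines logs file_ext_id context_lines out) := by unfold Spec_filter_log_lines; infer_instance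

-- ===== CLAIM (what is proved, stated in full; the proofs are below) =====
def Claim_equal_filter_log_lines : Prop := ∀ (logs : String) (file_ext_id : String) (context_lines : Int), Dom_filter_log_lines logs file_ext_id context_lines → Pre_filter_log_lines logs file_ext_id context_lines → Spec_filter_log_lines logs file_ext_id context_lines (filter_log_lines logs file_ext_id context_lines)

-- ===== LEMMAS AND PROOFS =====

-- does line i of L contain fid?
def pvm (fid : String) (L : List String) (i : Int) : Bool :=
  PySem.Str.isIn fid (PySem.List.pyGetD L i "")

-- A's context window of a match at i
def pvw (c N i : Int) : Int × Int := (max 0 (i - c), min N (i + c + 1))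

-- A's merge step (same term as the lambda in port A)
def pvMergeStep : List (Int × Int) → (Int × Int) → List (Int × Int) :=
  fun acc p => match acc with
    | [] => [p]
    | q :: rest => if p.1 > q.2 then p :: q :: rest else (q.1, max q.2 p.2) :: rest

-- block text of an interval
def pvBlk (L : List String) (p : Int × Int) : String :=
  PySem.Str.join "\n" (PySem.List.slice L (some p.1) (some p.2))

-- B's near predicate (same term as the let-bound 'near' in port B)
def pvNear (fid : String) (c : Int) (L : List String) (j : Int) : Bool :=
  (PySem.List.pyRange (max 0 (j - c)) (min (L.length : Int) (j + c + 1)) 1).any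
    (fun i => PySem.Str.isIn fid (PySem.List.pyGetD L i ""))

-- B's sweep step (same term as the lambda in port B)
def pvSweepStep (fid : String) (c : Int) (L : List String) :
    (List String × List String) → Int → (List String × List String) :=
  fun st j =>
    if pvNear fid c L j then (st.1, st.2 ++ [PySem.List.pyGetD L j ""])
    else if st.2 ≠ [] then (st.1 ++ [PySem.Str.join "\n" st.2], [])
    else st

-- B's final flush
def pvFinal (st : List String × List String) : List String :=
  if st.2 ≠ [] then st.1 ++ [PySem.Str.join "\n" st.2] else st.1

-- interval list covers j
def pvCov (Ms : List (Int × Int)) (j : Int) : Prop := ∃ p ∈ Ms, p.1 ≤ j ∧ j < p.2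

-- A after the guard, in combinator form
def pvA (fid : String) (L : List String) (c : Int) : String :=
  let M0 := (PySem.List.enumerate L 0).foldl
      (fun acc p => if PySem.Str.isIn fid p.2 then acc ++ [p.1] else acc) ([] : List Int)
  if M0 = [] then "" else
  PySem.Str.join "\n\n---\n\n"
    (((PySem.List.sorted
          (M0.foldl (fun acc idx => acc ++ [(max 0 (idx - c),
              min ((L.length : Int)) (idx + c + 1))]) [])
          (fun p => toLex p) false).foldl pvMergeStep []).reverse.foldl
      (fun acc p => acc ++ [pvBlk L p]) [])

-- B after the guard, in combinator form
def pvB (fid : String) (L : List String) (c : Int) : String :=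
  PySem.Str.join "\n\n---\n\n"
    (pvFinal ((PySem.List.pyRange 0 ((L.length : Int)) 1).foldl (pvSweepStep fid c L) ([], [])))

lemma pvA_bridge (logs fid : String) (c : Int) :
    filter_log_lines logs fid c
      = if logs = "" ∨ fid = "" then "" else pvA fid (PySem.Str.splitlines logs) c := rfl

lemma pvB_bridge (logs fid : String) (c : Int) :
    filter_log_lines_alt logs fid c
      = if logs = "" ∨ fid = "" then "" else pvB fid (PySem.Str.splitlines logs) c := rfl

lemma pvCov_nil (j : Int) : pvCov [] j ↔ False := by simp [pvCov]

lemma pvCov_cons (p : Int × Int) (l : List (Int × Int)) (j : Int) :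
    pvCov (p :: l) j ↔ (p.1 ≤ j ∧ j < p.2) ∨ pvCov l j := by
  simp [pvCov, List.mem_cons]

-- the matching-index loop of A computes the filtered index range
lemma pv_matchIdx (fid : String) (L : List String) :
    (PySem.List.enumerate L 0).foldl
      (fun acc p => if PySem.Str.isIn fid p.2 then acc ++ [p.1] else acc) ([] : List Int)
      = (PySem.List.pyRange 0 (L.length : Int) 1).filter (pvm fid L) := by
  rw [PySem.List.foldl_append_if, PySem.List.enumerate_eq_map_pyRange (d := ""),
    List.filter_map, List.map_map]
  simp [Function.comp_def]
  rfl

lemma pv_mem_M (fid : String) (L : List String) (i : Int) :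
    i ∈ (PySem.List.pyRange 0 (L.length : Int) 1).filter (pvm fid L)
      ↔ 0 ≤ i ∧ i < (L.length : Int) ∧ pvm fid L i = true := by
  simp [List.mem_filter, PySem.List.mem_pyRange_one, and_assoc]

-- B's near predicate in terms of matching indices
lemma pv_near_iff (fid : String) (L : List String) (c j : Int) (h0 : 0 ≤ j)
    (hj : j < (L.length : Int)) :
    pvNear fid c L j = true
      ↔ ∃ i ∈ (PySem.List.pyRange 0 (L.length : Int) 1).filter (pvm fid L),
          (pvw c (L.length : Int) i).1 ≤ j ∧ j < (pvw c (L.length : Int) i).2 := by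
  unfold pvNear
  rw [List.any_eq_true]
  constructor
  · rintro ⟨i, hi, hm⟩
    rw [PySem.List.mem_pyRange_one] at hi
    exact ⟨i, (pv_mem_M fid L i).2 ⟨by omega, by omega, hm⟩, by simp [pvw]; omega⟩
  · rintro ⟨i, hi, h1, h2⟩
    rw [pv_mem_M] at hi
    refine ⟨i, ?_, hi.2.2⟩
    rw [PySem.List.mem_pyRange_one]
    simp [pvw] at h1 h2
    omega

-- the windows of the (increasing) matching indices are already sorted
lemma pv_sorted_windows (c N : Int) (M : List Int) (hpw : M.Pairwise (· < ·)) :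
    PySem.List.sorted (M.map (pvw c N)) (fun p => toLex p) false = M.map (pvw c N) := by
  apply PySem.List.sorted_eq_self_of_pairwise
  refine List.Pairwise.map _ ?_ hpw
  intro a b hab
  rw [Prod.Lex.toLex_le_toLex]
  simp [pvw]
  omega

-- the merge fold invariant
lemma pv_merge_fold (c N : Int) (hc : 0 ≤ c) :
    ∀ (M : List Int) (q : Int × Int) (racc : List (Int × Int)),
    M.Pairwise (· < ·) → (∀ i ∈ M, 0 ≤ i ∧ i < N) →
    (0 ≤ q.1 ∧ q.1 < q.2 ∧ q.2 ≤ N) →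
    (∀ i ∈ M, q.1 ≤ max 0 (i - c)) → (∀ i ∈ M, q.2 ≤ min N (i + c + 1)) →
    (q :: racc).Pairwise (fun a b => b.2 < a.1) →
    (∀ p ∈ racc, 0 ≤ p.1 ∧ p.1 < p.2 ∧ p.2 ≤ N) →
    ∃ q' racc',
      (M.map (pvw c N)).foldl pvMergeStep (q :: racc) = q' :: racc' ∧
      (q' :: racc').Pairwise (fun a b => b.2 < a.1) ∧
      (∀ p ∈ q' :: racc', 0 ≤ p.1 ∧ p.1 < p.2 ∧ p.2 ≤ N) ∧
      (∀ j, pvCov (q' :: racc') j ↔ ((q.1 ≤ j ∧ j < q.2) ∨ pvCov racc j ∨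
          ∃ i ∈ M, (pvw c N i).1 ≤ j ∧ j < (pvw c N i).2)) := by
  intro M
  induction M with
  | nil =>
    intro q racc _ _ hq _ _ hch hracc
    refine ⟨q, racc, rfl, hch, ?_, ?_⟩
    · intro p hp
      rcases List.mem_cons.mp hp with h | h
      · rw [h]; exact hq
      · exact hracc p h
    · intro j
      simp [pvCov, List.mem_cons]
  | cons i M' ih =>
    intro q racc hpw hbM hq hstart hend hch hracc
    have hi := hbM i List.mem_cons_self
    have hs : q.1 ≤ max 0 (i - c) := hstart i List.mem_cons_self
    have he : q.2 ≤ min N (i + c + 1) := hend i List.mem_cons_self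
    have hiM' : ∀ i' ∈ M', i < i' := (List.pairwise_cons.mp hpw).1
    have hw1 : (pvw c N i).1 = max 0 (i - c) := rfl
    have hw2 : (pvw c N i).2 = min N (i + c + 1) := rfl
    rw [List.map_cons, List.foldl_cons]
    have hred : pvMergeStep (q :: racc) (pvw c N i)
        = if (pvw c N i).1 > q.2 then pvw c N i :: q :: racc
          else (q.1, max q.2 (pvw c N i).2) :: racc := rfl
    rw [hred]
    by_cases hgt : (pvw c N i).1 > q.2
    · rw [if_pos hgt]
      obtain ⟨q', racc', heq, hpw', hb', hun⟩ :=
        ih (pvw c N i) (q :: racc) (List.pairwise_cons.mp hpw).2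
          (fun i' hi' => hbM i' (List.mem_cons_of_mem _ hi'))
          ⟨by omega, by rw [hw1, hw2]; omega, by rw [hw2]; omega⟩
          (fun i' hi' => by rw [hw1]; have := hiM' i' hi'; omega)
          (fun i' hi' => by rw [hw2]; have := hiM' i' hi'; omega)
          (by
            rw [List.pairwise_cons]
            refine ⟨?_, hch⟩
            intro p hp
            rcases List.mem_cons.mp hp with h | h
            · rw [h]; omega
            · have := (List.pairwise_cons.mp hch).1 p h
              omega)
          (by
            intro p hp
            rcases List.mem_cons.mp hp with h | h
            · rw [h]; exact hq
            · exact hracc p h)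
      refine ⟨q', racc', heq, hpw', hb', ?_⟩
      intro j
      rw [hun j, pvCov_cons, List.exists_mem_cons_iff]
      tauto
    · rw [if_neg hgt]
      have hmax : max q.2 (pvw c N i).2 = (pvw c N i).2 := by rw [hw2]; omega
      rw [hmax]
      obtain ⟨q', racc', heq, hpw', hb', hun⟩ :=
        ih (q.1, (pvw c N i).2) racc (List.pairwise_cons.mp hpw).2
          (fun i' hi' => hbM i' (List.mem_cons_of_mem _ hi'))
          ⟨hq.1, by rw [hw2]; omega, by rw [hw2]; omega⟩
          (fun i' hi' => hstart i' (List.mem_cons_of_mem _ hi'))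
          (fun i' hi' => by rw [hw2]; have := hiM' i' hi'; omega)
          (by
            rw [List.pairwise_cons]
            exact ⟨fun p hp => (List.pairwise_cons.mp hch).1 p hp,
              (List.pairwise_cons.mp hch).2⟩)
          hracc
      refine ⟨q', racc', heq, hpw', hb', ?_⟩
      intro j
      rw [hun j]
      have hle : (pvw c N i).1 ≤ q.2 := by omega
      constructor
      · rintro (⟨h1, h2⟩ | h | h)
        · by_cases hj : j < q.2
          · exact Or.inl ⟨h1, hj⟩
          · exact Or.inr (Or.inr ⟨i, List.mem_cons_self, by omega⟩)
        · exact Or.inr (Or.inl h)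
        · obtain ⟨i', hi', hcov⟩ := h
          exact Or.inr (Or.inr ⟨i', List.mem_cons_of_mem _ hi', hcov⟩)
      · rintro (⟨h1, h2⟩ | h | h)
        · exact Or.inl ⟨h1, by rw [hw2]; omega⟩
        · exact Or.inr (Or.inl h)
        · obtain ⟨i', hi', hcov⟩ := h
          rcases List.mem_cons.mp hi' with h' | h'
          · subst h'
            exact Or.inl ⟨by omega, hcov.2⟩
          · exact Or.inr (Or.inr ⟨i', h', hcov⟩)

-- A's merged list: separated, in-bounds, covering exactly the union of the windows
lemma pv_merged_spec (c N : Int) (hc : 0 ≤ c) (M : List Int)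
    (hpw : M.Pairwise (· < ·)) (hb : ∀ i ∈ M, 0 ≤ i ∧ i < N) :
    ∃ Ms : List (Int × Int),
      ((M.map (pvw c N)).foldl pvMergeStep []).reverse = Ms ∧
      Ms.Pairwise (fun p q => p.2 < q.1) ∧
      (∀ p ∈ Ms, 0 ≤ p.1 ∧ p.1 < p.2 ∧ p.2 ≤ N) ∧
      (∀ j, pvCov Ms j ↔ ∃ i ∈ M, (pvw c N i).1 ≤ j ∧ j < (pvw c N i).2) := by
  cases M with
  | nil =>
    exact ⟨[], rfl, List.Pairwise.nil, by simp, by intro j; rw [pvCov_nil]; simp⟩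
  | cons i0 M' =>
    have hi0 := hb i0 List.mem_cons_self
    have hiM' : ∀ i' ∈ M', i0 < i' := (List.pairwise_cons.mp hpw).1
    rw [List.map_cons, List.foldl_cons]
    have hred : pvMergeStep [] (pvw c N i0) = [pvw c N i0] := rfl
    rw [hred]
    obtain ⟨q', racc', heq, hpw', hb', hun⟩ :=
      pv_merge_fold c N hc M' (pvw c N i0) [] (List.pairwise_cons.mp hpw).2
        (fun i' hi' => hb i' (List.mem_cons_of_mem _ hi'))
        ⟨by simp [pvw], by simp only [pvw]; omega, by simp only [pvw]; omega⟩
        (fun i' hi' => by simp only [pvw]; have := hiM' i' hi'; omega)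
        (fun i' hi' => by simp only [pvw]; have := hiM' i' hi'; omega)
        (by simp) (by simp)
    refine ⟨(q' :: racc').reverse, by rw [heq], ?_, ?_, ?_⟩
    · rw [List.pairwise_reverse]; exact hpw'
    · intro p hp; exact hb' p (List.mem_reverse.mp hp)
    · intro j
      have hrev : pvCov ((q' :: racc').reverse) j ↔ pvCov (q' :: racc') j := by
        unfold pvCov
        constructor
        · rintro ⟨p, hp, h⟩; exact ⟨p, List.mem_reverse.mp hp, h⟩
        · rintro ⟨p, hp, h⟩; exact ⟨p, List.mem_reverse.mpr hp, h⟩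
      rw [hrev, hun j, pvCov_nil, List.exists_mem_cons_iff]
      tauto

-- sweeping an all-unkept stretch with an empty run does nothing
lemma pv_sweep_false (fid : String) (c : Int) (L : List String) :
    ∀ (n : Nat) (a b : Int) (B : List String), (b - a).toNat = n →
    (∀ j, a ≤ j → j < b → pvNear fid c L j = false) →
    (PySem.List.pyRange a b 1).foldl (pvSweepStep fid c L) (B, []) = (B, []) := by
  intro n
  induction n with
  | zero =>
    intro a b B hn _
    rw [PySem.List.pyRange_one_eq_nil (by omega)]
    rfl
  | succ n ih =>
    intro a b B hn hf
    rw [PySem.List.pyRange_one_cons (by omega), List.foldl_cons]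
    have h1 : pvSweepStep fid c L (B, []) a = (B, []) := by
      simp [pvSweepStep, hf a le_rfl (by omega)]
    rw [h1]
    exact ih (a + 1) b B (by omega) (fun j hj1 hj2 => hf j (by omega) hj2)

-- sweeping an all-kept stretch appends those lines to the run
lemma pv_sweep_true (fid : String) (c : Int) (L : List String) :
    ∀ (n : Nat) (a b : Int) (B r : List String), (b - a).toNat = n →
    (∀ j, a ≤ j → j < b → pvNear fid c L j = true) →
    (PySem.List.pyRange a b 1).foldl (pvSweepStep fid c L) (B, r)
      = (B, r ++ (PySem.List.pyRange a b 1).map (fun j => PySem.List.pyGetD L j "")) := by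
  intro n
  induction n with
  | zero =>
    intro a b B r hn _
    rw [PySem.List.pyRange_one_eq_nil (by omega)]
    simp
  | succ n ih =>
    intro a b B r hn ht
    rw [PySem.List.pyRange_one_cons (by omega), List.foldl_cons]
    have h1 : pvSweepStep fid c L (B, r) a = (B, r ++ [PySem.List.pyGetD L a ""]) := by
      simp [pvSweepStep, ht a le_rfl (by omega)]
    rw [h1, ih (a + 1) b B _ (by omega) (fun j hj1 hj2 => ht j (by omega) hj2)]
    simp

-- reading a range of lines is the slice
lemma pv_map_slice (L : List String) (s e : Int) (h0 : 0 ≤ s) (hse : s ≤ e)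
    (he : e ≤ (L.length : Int)) :
    (PySem.List.pyRange s e 1).map (fun j => PySem.List.pyGetD L j "")
      = PySem.List.slice L (some s) (some e) := by
  rw [PySem.List.slice_of_nonneg L h0 (by omega) (by omega) he]
  apply List.ext_getElem
  · simp [PySem.List.length_pyRange_one]
    omega
  · intro k h1 h2
    have hk : (k : ℤ) < e - s := by
      simp [PySem.List.length_pyRange_one] at h1
      omega
    simp only [List.getElem_map, PySem.List.getElem_pyRange_one, List.getElem_take,
      List.getElem_drop]
    rw [PySem.List.pyGetD_eq_getElem L (i := s + (k : ℤ)) "" (by omega) (by omega)]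
    congr 1
    omega

-- the run-detection sweep over a separated covering interval list emits one block per interval
lemma pv_sweep (fid : String) (c : Int) (L : List String) :
    ∀ (Ms : List (Int × Int)) (a : Int) (B : List String),
    0 ≤ a → a ≤ (L.length : Int) →
    Ms.Pairwise (fun p q => p.2 < q.1) →
    (∀ p ∈ Ms, a ≤ p.1 ∧ p.1 < p.2 ∧ p.2 ≤ (L.length : Int)) →
    (∀ j, a ≤ j → j < (L.length : Int) → (pvNear fid c L j = true ↔ pvCov Ms j)) →
    pvFinal ((PySem.List.pyRange a (L.length : Int) 1).foldl (pvSweepStep fid c L) (B, []))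
      = B ++ Ms.map (pvBlk L) := by
  intro Ms
  induction Ms with
  | nil =>
    intro a B h0 hN _ _ hiff
    rw [pv_sweep_false fid c L ((L.length : Int) - a).toNat a _ B rfl ?_]
    · simp [pvFinal]
    · intro j hj1 hj2
      cases h : pvNear fid c L j with
      | false => rfl
      | true => exact absurd ((hiff j hj1 hj2).1 h) (by simp [pvCov])
  | cons p Ms' ih =>
    intro a B h0 hN hpw hb hiff
    obtain ⟨s, e⟩ := p
    have hmem : (s, e) ∈ (s, e) :: Ms' := List.mem_cons_self
    have has : a ≤ s := (hb _ hmem).1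
    have hse : s < e := (hb _ hmem).2.1
    have heN : e ≤ (L.length : Int) := (hb _ hmem).2.2
    have hMs' : ∀ q ∈ Ms', e < q.1 := (List.pairwise_cons.mp hpw).1
    have hnotnear : ∀ j, a ≤ j → j < (L.length : Int) → j < s ∨ j = e → pvNear fid c L j = false := by
      intro j hj1 hjN hj2
      cases h : pvNear fid c L j with
      | false => rfl
      | true =>
        obtain ⟨q, hq, hq1, hq2⟩ := (hiff j hj1 hjN).1 h
        rcases List.mem_cons.mp hq with h' | h'
        · subst h'; omega
        · have := hMs' q h'
          have := (hb q (List.mem_cons_of_mem _ h')).2.1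
          omega
    rw [PySem.List.pyRange_one_append a s (L.length : Int) (by omega) (by omega),
      List.foldl_append,
      pv_sweep_false fid c L (s - a).toNat a s B rfl
        (fun j hj1 hj2 => hnotnear j hj1 (by omega) (Or.inl hj2)),
      PySem.List.pyRange_one_append s e (L.length : Int) (by omega) (by omega),
      List.foldl_append,
      pv_sweep_true fid c L (e - s).toNat s e B [] rfl
        (fun j hj1 hj2 => (hiff j (by omega) (by omega)).2 ⟨(s, e), hmem, by omega⟩)]
    have hrmap : ([] : List String) ++ (PySem.List.pyRange s e 1).map (fun j => PySem.List.pyGetD L j "")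
        = PySem.List.slice L (some s) (some e) := by
      rw [List.nil_append, pv_map_slice L s e (by omega) (by omega) heN]
    rw [hrmap]
    have hrne : PySem.List.slice L (some s) (some e) ≠ [] := by
      rw [← pv_map_slice L s e (by omega) (by omega) heN,
        PySem.List.pyRange_one_cons hse]
      simp
    by_cases heN' : e < (L.length : Int)
    · rw [PySem.List.pyRange_one_cons heN', List.foldl_cons]
      have hstep : pvSweepStep fid c L (B, PySem.List.slice L (some s) (some e)) e
          = (B ++ [PySem.Str.join "\n" (PySem.List.slice L (some s) (some e))], []) := by
        simp [pvSweepStep, hnotnear e (by omega) (by omega) (Or.inr rfl), hrne]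
      rw [hstep, ih (e + 1) _ (by omega) (by omega) (List.pairwise_cons.mp hpw).2
        (fun q hq => ⟨by have := hMs' q hq; omega, (hb q (List.mem_cons_of_mem _ hq)).2⟩) ?_]
      · simp [pvBlk, List.append_assoc]
      · intro j hj1 hj2
        rw [hiff j (by omega) hj2]
        constructor
        · rintro ⟨q, hq, hq1, hq2⟩
          rcases List.mem_cons.mp hq with h' | h'
          · exfalso; rw [h'] at hq1 hq2; simp at hq1 hq2; omega
          · exact ⟨q, h', hq1, hq2⟩
        · rintro ⟨q, hq, hq1, hq2⟩
          exact ⟨q, List.mem_cons_of_mem _ hq, hq1, hq2⟩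
    · have heq : e = (L.length : Int) := by omega
      have hnil : Ms' = [] := by
        cases Ms' with
        | nil => rfl
        | cons q t =>
          exfalso
          have h1 := hMs' q List.mem_cons_self
          have h2 := (hb q (List.mem_cons_of_mem _ List.mem_cons_self)).2
          omega
      rw [hnil, show PySem.List.pyRange e (L.length : Int) 1 = [] from by
          rw [heq]; exact PySem.List.pyRange_one_eq_nil le_rfl,
        List.foldl_nil]
      simp [pvFinal, hrne, pvBlk]

lemma core (fid : String) (L : List String) (c : Int) (hc : 0 ≤ c) :
    pvA fid L c = pvB fid L c := by
  unfold pvA pvB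
  rw [pv_matchIdx]
  have hN0 : (0 : ℤ) ≤ (L.length : Int) := Int.natCast_nonneg _
  set M := (PySem.List.pyRange 0 (L.length : Int) 1).filter (pvm fid L) with hMdef
  have hpw : M.Pairwise (· < ·) := List.Pairwise.filter _ (PySem.List.pairwise_lt_pyRange_one 0 _)
  have hbM : ∀ i ∈ M, 0 ≤ i ∧ i < (L.length : Int) := by
    intro i hi
    have h := (pv_mem_M fid L i).mp hi
    exact ⟨h.1, h.2.1⟩
  by_cases hM : M = []
  · rw [if_pos hM]
    rw [pv_sweep fid c L [] 0 [] le_rfl hN0 List.Pairwise.nil (by simp) ?_]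
    · simp
      rfl
    · intro j h1 h2
      rw [pvCov_nil, pv_near_iff fid L c j h1 h2, ← hMdef, hM]
      simp
  · rw [if_neg hM]
    rw [PySem.List.foldl_append_singleton_eq_map
      (f := fun idx => (max 0 (idx - c), min ((L.length : Int)) (idx + c + 1))),
      List.nil_append]
    have hwfun : (fun idx => (max 0 (idx - c), min ((L.length : Int)) (idx + c + 1)))
        = pvw c (L.length : Int) := rfl
    rw [hwfun, pv_sorted_windows _ _ M hpw]
    obtain ⟨Ms, hMs, hpw', hb', hun⟩ := pv_merged_spec c (L.length : Int) hc M hpw hbM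
    rw [hMs, PySem.List.foldl_append_singleton_eq_map (f := pvBlk L), List.nil_append]
    rw [pv_sweep fid c L Ms 0 [] le_rfl hN0 hpw' (fun p hp => hb' p hp) ?_]
    · rw [List.nil_append]
    · intro j h1 h2
      rw [pv_near_iff fid L c j h1 h2, ← hMdef, hun j]

-- ===== VERDICT (by name: the statement is the Claim_ definition above) =====
theorem filter_log_lines_spec : Claim_equal_filter_log_lines := by
  intro logs fid c _ hpre
  unfold Spec_filter_log_lines
  rw [pvA_bridge, pvB_bridge]
  by_cases hg : logs = "" ∨ fid = ""
  · simp [hg]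
  · simp only [if_neg hg]; exact core fid (PySem.Str.splitlines logs) c hpre
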